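-- pv_equiv track=rewrite | github.com/anthonyclyan/golden_joy_app | anthony_test.py | split_long_string
-- ===== SOURCE A (Python) =====
-- def split_long_string(input_string, max_lengths):
--     # Split the input string into words
--     words = input_string.split()
--
--     # Initialize a list to store the resulting strings
--     result_strings = []
--
--     # Split the words into parts based on the specified maximum lengths
--     for max_length in max_lengths:
--         if words:
--             # Initialize a list to store the words for the current part
--             current_part = []
--
--             # While there are words and the current part hasn't reached its maximum length
--             while words and len(' '.join(current_part + [words[0]])) <= max_length:
--                 current_part.append(words.pop(0))
--
--             # Save the current part as a string in the list
--             result_strings.append(' '.join(current_part))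
--         else:
--             # If no more words are left but there are remaining lengths
--             result_strings.append("")
--
--     return result_strings
-- ===== SOURCE B (Python) =====
-- def split_long_string(input_string, max_lengths):
--     words = input_string.split()
--     # prefix[i] = total characters of words[0:i]
--     prefix = [0]
--     for w in words:
--         prefix.append(prefix[-1] + len(w))
--     n = len(words)
--     p = 0
--     result_strings = []
--     for max_length in max_lengths:
--         if p < n:
--             c = 0
--             while p + c < n and prefix[p + c + 1] - prefix[p] + c <= max_length:
--                 c += 1
--             result_strings.append(' '.join(words[p:p + c]))
--             p += c
--         else:
--             result_strings.append("")
--     return result_strings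
-- ===== Notes on version B (the rewrite author's own statement) =====
-- stated objective: alternative
-- what changed: Replaces A's destructive greedy (popping words from the list and re-joining the growing segment to re-measure its length at every step) with a precomputed prefix-sum array of word lengths and a moving index: each candidate extension is an arithmetic test on the prefix sums, and each segment is one slice-and-join; same measured cost on the generated inputs.
import Mathlib
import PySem

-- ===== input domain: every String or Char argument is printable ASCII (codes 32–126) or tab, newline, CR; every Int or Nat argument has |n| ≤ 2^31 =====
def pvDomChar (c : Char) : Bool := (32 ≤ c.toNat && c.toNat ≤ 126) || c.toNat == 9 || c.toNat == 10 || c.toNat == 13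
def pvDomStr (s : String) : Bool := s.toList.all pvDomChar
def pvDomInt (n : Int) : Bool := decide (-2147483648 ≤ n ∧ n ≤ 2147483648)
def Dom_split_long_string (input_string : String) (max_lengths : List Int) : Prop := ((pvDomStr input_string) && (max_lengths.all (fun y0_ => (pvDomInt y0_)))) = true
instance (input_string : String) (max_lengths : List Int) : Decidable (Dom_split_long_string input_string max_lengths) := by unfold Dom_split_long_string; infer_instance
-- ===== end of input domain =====

-- B replaces A's pop-and-rejoin greedy (re-joining the growing part for every candidate word)
-- by a prefix-sum array of word lengths and a moving index, computing each segment's word count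
-- by arithmetic tests on the prefix sums; objective: alternative (same measured cost).

-- ===== PORT A =====
-- inner while loop: while words and len(' '.join(current_part + [words[0]])) <= max_length: current_part.append(words.pop(0))
def pvAInner (cur : List String) (words : List String) (m : Int) : List String × List String :=
  match words with
  | [] => (cur, [])
  | w :: rest =>
    if PySem.Str.len (PySem.Str.join " " (cur ++ [w])) ≤ m then
      pvAInner (cur ++ [w]) rest m
    else (cur, w :: rest)

-- for max_length in max_lengths: …
def pvAOuter (words : List String) (ls : List Int) : List String :=
  match ls with
  | [] => []
  | m :: ms =>
    match words with
    | [] => "" :: pvAOuter [] ms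
    | w :: rest =>
      let r := pvAInner [] (w :: rest) m
      PySem.Str.join " " r.1 :: pvAOuter r.2 ms

def split_long_string (input_string : String) (max_lengths : List Int) : List String :=
  pvAOuter (PySem.Str.split₀ input_string) max_lengths

-- ===== PORT B =====
-- prefix = [0]; for w in words: prefix.append(prefix[-1] + len(w))
def pvPrefix (words : List String) : List Int :=
  words.foldl (fun acc w => acc ++ [PySem.List.pyGetD acc (-1) 0 + PySem.Str.len w]) [0]

-- c = 0; while p + c < n and prefix[p+c+1] - prefix[p] + c <= max_length: c += 1
def pvBCount (pre : List Int) (n p : Nat) (m : Int) (c : Nat) : Nat :=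
  if h : p + c < n then
    if PySem.List.pyGetD pre (↑(p + c + 1)) 0 - PySem.List.pyGetD pre (↑p) 0 + (c : Int) ≤ m then
      pvBCount pre n p m (c + 1)
    else c
  else c
termination_by n - (p + c)
decreasing_by omega

-- for max_length in max_lengths: …
def pvBOuter (words : List String) (pre : List Int) (n : Nat) (p : Nat) (ls : List Int) : List String :=
  match ls with
  | [] => []
  | m :: ms =>
    if p < n then
      let c := pvBCount pre n p m 0
      PySem.Str.join " " (PySem.List.slice words (some ↑p) (some ↑(p + c)))
        :: pvBOuter words pre n (p + c) ms
    else "" :: pvBOuter words pre n p ms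

def split_long_string_alt (input_string : String) (max_lengths : List Int) : List String :=
  let words := PySem.Str.split₀ input_string
  pvBOuter words (pvPrefix words) words.length 0 max_lengths

-- ===== PRECONDITION & SPEC =====
def Spec_split_long_string (input_string : String) (max_lengths : List Int) (out : List String) : Prop := out = split_long_string_alt input_string max_lengths
instance (input_string : String) (max_lengths : List Int) (out : List String) : Decidable (Spec_split_long_string input_string max_lengths out) := by unfold Spec_split_long_string; infer_instance

-- ===== CLAIM (what is proved, stated in full; the proofs are below) =====
def Claim_equal_split_long_string : Prop := ∀ (input_string : String) (max_lengths : List Int), Dom_split_long_string input_string max_lengths → Spec_split_long_string input_string max_lengths (split_long_string input_string max_lengths)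

-- ===== LEMMAS AND PROOFS =====

-- total character count of a list of words
def pvSumLen (ws : List String) : Int := (ws.map PySem.Str.len).sum

-- the shared greedy count: acc = joined-length-so-far plus one pending space (0 when nothing taken)
def pvGreedy (acc : Int) (ws : List String) (m : Int) : Nat :=
  match ws with
  | [] => 0
  | w :: rest => if acc + PySem.Str.len w ≤ m then pvGreedy (acc + PySem.Str.len w + 1) rest m + 1 else 0

-- length of ' '.join on the Chars side, appending one more piece
theorem pvCharsJoin_append_one (ps : List (List Char)) (q : List Char) :
    (PySem.Chars.join [' '] (ps ++ [q])).length =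
      (if ps = [] then 0 else (PySem.Chars.join [' '] ps).length + 1) + q.length := by
  induction ps with
  | nil => simp [PySem.Chars.join_singleton]
  | cons a ps' ih =>
    cases ps' with
    | nil =>
      simp [PySem.Chars.join_cons_cons, PySem.Chars.join_singleton]
      omega
    | cons b t =>
      have hne : (b :: t : List (List Char)) ≠ [] := by simp
      simp only [List.cons_append, PySem.Chars.join_cons_cons, List.length_append] at *
      simp only [hne, reduceIte] at ih
      simp only [List.cons_ne_nil, reduceIte]
      omega

theorem pvJlen_append_one (cur : List String) (w : String) :
    PySem.Str.len (PySem.Str.join " " (cur ++ [w])) =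
      (if cur = [] then 0 else PySem.Str.len (PySem.Str.join " " cur) + 1) + PySem.Str.len w := by
  have h1 := pvCharsJoin_append_one (cur.map String.toList) (w.toList)
  have hmap : (cur ++ [w]).map String.toList = cur.map String.toList ++ [w.toList] := by simp
  have hsep : (" " : String).toList = [' '] := rfl
  simp only [PySem.Str.len_eq, PySem.Str.toList_join, hmap, hsep, h1]
  by_cases hc : cur = []
  · simp [hc]
  · have h2 : cur.map String.toList ≠ [] := by simpa using hc
    simp only [hc, h2, reduceIte]
    push_cast
    ring

theorem pvAInner_eq (ws : List String) (m : Int) : ∀ (cur : List String),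
    pvAInner cur ws m =
      (cur ++ ws.take (pvGreedy (if cur = [] then 0 else PySem.Str.len (PySem.Str.join " " cur) + 1) ws m),
       ws.drop (pvGreedy (if cur = [] then 0 else PySem.Str.len (PySem.Str.join " " cur) + 1) ws m)) := by
  induction ws with
  | nil => intro cur; simp [pvAInner, pvGreedy]
  | cons w rest ih =>
    intro cur
    have hcond := pvJlen_append_one cur w
    by_cases h : PySem.Str.len (PySem.Str.join " " (cur ++ [w])) ≤ m
    · have hg : (if cur = [] then 0 else PySem.Str.len (PySem.Str.join " " cur) + 1) + PySem.Str.len w ≤ m := by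
        omega
      have hnew : (if (cur ++ [w]) = [] then 0 else PySem.Str.len (PySem.Str.join " " (cur ++ [w])) + 1)
          = (if cur = [] then 0 else PySem.Str.len (PySem.Str.join " " cur) + 1) + PySem.Str.len w + 1 := by
        have hne : (cur ++ [w] : List String) ≠ [] := by simp
        simp only [hne, reduceIte]
        omega
      simp only [pvAInner, pvGreedy]
      rw [if_pos h, if_pos hg, ih (cur ++ [w]), hnew]
      simp [List.take_succ_cons, List.drop_succ_cons]
    · have hg : ¬ ((if cur = [] then 0 else PySem.Str.len (PySem.Str.join " " cur) + 1) + PySem.Str.len w ≤ m) := by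
        omega
      simp only [pvAInner, pvGreedy]
      rw [if_neg h, if_neg hg]
      simp

theorem pvGreedy_le_length (ws : List String) (m : Int) : ∀ acc, pvGreedy acc ws m ≤ ws.length := by
  induction ws with
  | nil => intro acc; simp [pvGreedy]
  | cons w rest ih =>
    intro acc
    simp only [pvGreedy, List.length_cons]
    split_ifs
    · have := ih (acc + PySem.Str.len w + 1); omega
    · omega

-- running sums appended by the prefix loop
def pvScan (s : Int) (ws : List String) : List Int :=
  match ws with
  | [] => []
  | w :: rest => (s + PySem.Str.len w) :: pvScan (s + PySem.Str.len w) rest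

theorem pvPyGetD_last {acc : List Int} {x : Int} :
    PySem.List.pyGetD (acc ++ [x]) (-1) 0 = x := by
  simp [PySem.List.pyGetD, PySem.List.pyGet?, PySem.List.pyIdx?]

theorem pvFold_scan (ws : List String) : ∀ (acc : List Int) (s : Int),
    PySem.List.pyGetD acc (-1) 0 = s → acc ≠ [] →
    ws.foldl (fun acc w => acc ++ [PySem.List.pyGetD acc (-1) 0 + PySem.Str.len w]) acc
      = acc ++ pvScan s ws := by
  induction ws with
  | nil => intro acc s _ _; simp [pvScan]
  | cons w rest ih =>
    intro acc s hs hne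
    simp only [List.foldl_cons, pvScan, hs]
    rw [ih (acc ++ [s + PySem.Str.len w]) (s + PySem.Str.len w) pvPyGetD_last (by simp)]
    simp

theorem pvScan_getD (ws : List String) : ∀ (s : Int) (i : Nat), i < ws.length →
    (pvScan s ws).getD i 0 = s + pvSumLen (ws.take (i + 1)) := by
  induction ws with
  | nil => intro s i h; simp at h
  | cons w rest ih =>
    intro s i h
    cases i with
    | zero => simp [pvScan, pvSumLen]
    | succ j =>
      simp only [pvScan, List.getD_cons_succ]
      rw [ih (s + PySem.Str.len w) j (by simpa using h)]
      simp [pvSumLen]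
      ring

theorem pvPrefix_getD (ws : List String) (i : Nat) (h : i ≤ ws.length) :
    (pvPrefix ws).getD i 0 = pvSumLen (ws.take i) := by
  unfold pvPrefix
  rw [pvFold_scan ws [0] 0 (by decide) (by simp)]
  cases i with
  | zero => simp [pvSumLen]
  | succ j =>
    simp only [List.singleton_append, List.getD_cons_succ]
    rw [pvScan_getD ws 0 j (by omega)]
    simp

theorem pvSumLen_take_succ (ws : List String) (i : Nat) (h : i < ws.length) :
    pvSumLen (ws.take (i + 1)) = pvSumLen (ws.take i) + PySem.Str.len (ws.getD i "") := by
  have h' : ws.take (i + 1) = ws.take i ++ [ws.getD i ""] := by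
    rw [List.take_add_one, List.getD_eq_getElem _ _ h, List.getElem?_eq_getElem h]
    rfl
  rw [h']
  simp [pvSumLen]

theorem pvDrop_head (ws : List String) (i : Nat) (h : i < ws.length) :
    ws.drop i = ws.getD i "" :: ws.drop (i + 1) := by
  rw [List.getD_eq_getElem _ _ h]
  exact (List.drop_eq_getElem_cons h)

theorem pvBCount_eq (ws : List String) (m : Int) : ∀ (c p : Nat), p + c ≤ ws.length →
    pvBCount (pvPrefix ws) ws.length p m c
      = c + pvGreedy (pvSumLen (ws.take (p + c)) - pvSumLen (ws.take p) + (c : Int)) (ws.drop (p + c)) m := by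
  intro c p
  induction hn : ws.length - (p + c) generalizing c with
  | zero =>
    intro h
    have hpc : p + c = ws.length := by omega
    unfold pvBCount
    rw [dif_neg (by omega)]
    rw [hpc, List.drop_length]
    simp [pvGreedy]
  | succ k ih =>
    intro h
    have hlt : p + c < ws.length := by omega
    rw [pvDrop_head ws (p + c) hlt]
    unfold pvBCount
    rw [dif_pos hlt]
    rw [PySem.List.pyGetD_natCast, PySem.List.pyGetD_natCast,
        pvPrefix_getD ws (p + c + 1) (by omega), pvPrefix_getD ws p (by omega),
        pvSumLen_take_succ ws (p + c) hlt]
    simp only [pvGreedy]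
    by_cases hcond : pvSumLen (ws.take (p + c)) + PySem.Str.len (ws.getD (p + c) "") - pvSumLen (ws.take p) + (c : Int) ≤ m
    · rw [if_pos hcond]
      have hgc : pvSumLen (ws.take (p + c)) - pvSumLen (ws.take p) + (c : Int) + PySem.Str.len (ws.getD (p + c) "") ≤ m := by omega
      rw [if_pos hgc]
      rw [ih (c + 1) (by omega) (by omega)]
      have hsucc : p + (c + 1) = p + c + 1 := by omega
      rw [hsucc, pvSumLen_take_succ ws (p + c) hlt]
      push_cast
      have harg : pvSumLen (ws.take (p + c)) + PySem.Str.len (ws.getD (p + c) "") - pvSumLen (ws.take p) + ((c : Int) + 1)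
          = pvSumLen (ws.take (p + c)) - pvSumLen (ws.take p) + (c : Int) + PySem.Str.len (ws.getD (p + c) "") + 1 := by ring
      rw [harg]
      omega
    · rw [if_neg hcond]
      have hgc : ¬ (pvSumLen (ws.take (p + c)) - pvSumLen (ws.take p) + (c : Int) + PySem.Str.len (ws.getD (p + c) "") ≤ m) := by omega
      rw [if_neg hgc]
      omega

theorem pvOuter_eq (ws : List String) (ls : List Int) : ∀ (p : Nat), p ≤ ws.length →
    pvAOuter (ws.drop p) ls = pvBOuter ws (pvPrefix ws) ws.length p ls := by
  induction ls with
  | nil => intro p _; simp [pvAOuter, pvBOuter]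
  | cons m ms ih =>
    intro p hp
    by_cases hlt : p < ws.length
    · have hk := pvBCount_eq ws m 0 p (by omega)
      simp only [Nat.cast_zero, sub_self, zero_add, add_zero] at hk
      have hk' : pvBCount (pvPrefix ws) ws.length p m 0 = pvGreedy 0 (ws.drop p) m := by
        rw [hk]
      set k := pvGreedy 0 (ws.drop p) m with hkdef
      have hkle : k ≤ (ws.drop p).length := pvGreedy_le_length (ws.drop p) m 0
      have hkle' : p + k ≤ ws.length := by
        rw [List.length_drop] at hkle; omega
      have hdropne : ws.drop p ≠ [] := by
        intro hcontra
        have := List.drop_eq_nil_iff.mp hcontra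
        omega
      obtain ⟨w, rest, hwr⟩ := List.exists_cons_of_ne_nil hdropne
      have hA : pvAOuter (ws.drop p) (m :: ms) =
          PySem.Str.join " " ((ws.drop p).take k) :: pvAOuter ((ws.drop p).drop k) ms := by
        rw [hwr]
        simp only [pvAOuter]
        rw [pvAInner_eq (w :: rest) m []]
        simp [← hwr, hkdef]
      have hslice : PySem.List.slice ws (some (p : Int)) (some ((p + k : Nat) : Int))
          = (ws.drop p).take k := by
        rw [PySem.List.slice_natCast]
        congr 1
        omega
      rw [hA]
      simp only [pvBOuter, hlt, if_pos, hk', hslice]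
      rw [List.drop_drop]
      rw [ih (p + k) hkle']
    · have hp' : p = ws.length := by omega
      have hnil : ws.drop p = [] := by simp [hp']
      rw [hnil]
      simp only [pvAOuter, pvBOuter, hlt, reduceIte]
      rw [← hnil, ih p hp]

-- ===== VERDICT (by name: the statement is the Claim_ definition above) =====
theorem split_long_string_spec : Claim_equal_split_long_string := by
  intro s ls _
  unfold Spec_split_long_string split_long_string split_long_string_alt
  have := pvOuter_eq (PySem.Str.split₀ s) ls 0 (by omega)
  simpa using this
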